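-- pv_equiv track=rewrite | github.com/Ublyudok-kun/reversi | deshacerJugadas.py | deshacer_inferior_derecha
-- ===== SOURCE A (Python) =====
-- def deshacer_inferior_derecha(tablero, x, y, xf, yf, turno, dimension):
--     if ((x >= 0 and x < dimension) and (y >= 0 and y < dimension)):
--         try:
--             # abajo der
--             if ((xf-1 > x) and (y < yf-1)):
--                 tablero[x+1][y+1] = turno*-1
--                 deshacer_inferior_derecha(tablero, x+1, y+1, xf, yf, turno, dimension)
--             else:
--                 return tablero
--         except:
--             IndexError
--     return tablero
-- ===== SOURCE B (Python) =====
-- def deshacer_inferior_derecha(tablero, x, y, xf, yf, turno, dimension):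
--     # Iterative version: compute the number of diagonal steps in closed form,
--     # then walk the cursor down-right, writing until a write would fall off the lists.
--     if not (0 <= x < dimension and 0 <= y < dimension):
--         return tablero
--     steps = min(dimension - x, dimension - y, xf - 1 - x, yf - 1 - y)
--     for _ in range(steps):
--         if x + 1 < len(tablero) and y + 1 < len(tablero[x + 1]):
--             tablero[x + 1][y + 1] = -turno
--             x += 1
--             y += 1
--         else:
--             break
--     return tablero
-- ===== Notes on version B (the rewrite author's own statement) =====
-- stated objective: idiomatic
-- what changed: Replaces the self-recursion (re-checking all four bounds each call) with a closed-form step count min(dimension-x, dimension-y, xf-1-x, yf-1-y) followed by a bounded loop that walks the cursor and writes until a write would fall off the lists; no try/except needed.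
import Mathlib
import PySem

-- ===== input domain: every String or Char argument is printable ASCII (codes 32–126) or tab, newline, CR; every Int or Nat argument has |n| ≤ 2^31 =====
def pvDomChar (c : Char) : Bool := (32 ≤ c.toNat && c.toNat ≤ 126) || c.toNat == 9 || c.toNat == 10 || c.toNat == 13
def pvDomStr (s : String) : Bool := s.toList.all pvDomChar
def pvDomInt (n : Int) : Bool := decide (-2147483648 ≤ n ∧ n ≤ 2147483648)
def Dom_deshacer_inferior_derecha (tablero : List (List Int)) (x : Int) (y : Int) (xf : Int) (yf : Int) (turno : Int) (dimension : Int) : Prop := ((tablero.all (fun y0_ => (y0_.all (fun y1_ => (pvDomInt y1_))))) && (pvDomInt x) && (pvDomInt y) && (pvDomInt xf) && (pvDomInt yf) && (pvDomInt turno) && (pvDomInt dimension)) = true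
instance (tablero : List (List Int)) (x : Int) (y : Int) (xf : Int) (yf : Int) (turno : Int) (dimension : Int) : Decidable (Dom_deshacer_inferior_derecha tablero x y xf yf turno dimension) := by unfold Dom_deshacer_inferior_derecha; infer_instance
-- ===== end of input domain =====

-- B replaces A's self-recursion by a closed-form step count followed by an iterative
-- cursor walk (no try/except); equivalence is about the RETURN value (both Pythons also
-- mutate `tablero` in place, identically). Proved equal on the whole domain.

-- ===== PORT A =====
-- `tablero[x+1][y+1] = v` with Python's IndexError modelled as `none`
-- (exact here: both indices are ≥ 1 at every call site, so no negative wraparound occurs).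
def pvSetCell (tab : List (List Int)) (i j v : Int) : Option (List (List Int)) :=
  match PySem.List.pyGet? tab i with
  | none => none
  | some row =>
    match PySem.List.pySet? row j v with
    | none => none
    | some row' => PySem.List.pySet? tab i row'

def deshacer_inferior_derecha (tablero : List (List Int)) (x : Int) (y : Int) (xf : Int) (yf : Int) (turno : Int) (dimension : Int) : List (List Int) :=
  if 0 ≤ x ∧ x < dimension ∧ 0 ≤ y ∧ y < dimension then
    if xf - 1 > x ∧ y < yf - 1 then
      match pvSetCell tablero (x + 1) (y + 1) (turno * -1) with
      | some tab' => deshacer_inferior_derecha tab' (x + 1) (y + 1) xf yf turno dimension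
      | none => tablero   -- bare except: swallow, fall through to `return tablero`
    else tablero
  else tablero
termination_by (dimension - x).toNat
decreasing_by omega

-- ===== PORT B =====
-- the `for _ in range(steps): … else: break` loop of Source B
def pvAltLoop (turno : Int) : Nat → Int → Int → List (List Int) → List (List Int)
  | 0, _, _, tab => tab
  | n + 1, x, y, tab =>
    if x + 1 < (tab.length : Int) then
      match PySem.List.pyGet? tab (x + 1) with
      | some row =>
        if y + 1 < (row.length : Int) then
          pvAltLoop turno n (x + 1) (y + 1)
            (PySem.List.pySetD tab (x + 1) (PySem.List.pySetD row (y + 1) (-turno)))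
        else tab
      | none => tab
    else tab

def deshacer_inferior_derecha_alt (tablero : List (List Int)) (x : Int) (y : Int) (xf : Int) (yf : Int) (turno : Int) (dimension : Int) : List (List Int) :=
  if 0 ≤ x ∧ x < dimension ∧ 0 ≤ y ∧ y < dimension then
    pvAltLoop turno
      (min (min (dimension - x) (dimension - y)) (min (xf - 1 - x) (yf - 1 - y))).toNat
      x y tablero
  else tablero

-- ===== PRECONDITION & SPEC =====
def Spec_deshacer_inferior_derecha (tablero : List (List Int)) (x : Int) (y : Int) (xf : Int) (yf : Int) (turno : Int) (dimension : Int) (out : List (List Int)) : Prop := out = deshacer_inferior_derecha_alt tablero x y xf yf turno dimension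
instance (tablero : List (List Int)) (x : Int) (y : Int) (xf : Int) (yf : Int) (turno : Int) (dimension : Int) (out : List (List Int)) : Decidable (Spec_deshacer_inferior_derecha tablero x y xf yf turno dimension out) := by unfold Spec_deshacer_inferior_derecha; infer_instance

-- ===== CLAIM (what is proved, stated in full; the proofs are below) =====
def Claim_equal_deshacer_inferior_derecha : Prop := ∀ (tablero : List (List Int)) (x : Int) (y : Int) (xf : Int) (yf : Int) (turno : Int) (dimension : Int), Dom_deshacer_inferior_derecha tablero x y xf yf turno dimension → Spec_deshacer_inferior_derecha tablero x y xf yf turno dimension (deshacer_inferior_derecha tablero x y xf yf turno dimension)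

-- ===== LEMMAS AND PROOFS =====

theorem pvA_out (tablero : List (List Int)) (x y xf yf turno dimension : Int)
    (h : ¬ (0 ≤ x ∧ x < dimension ∧ 0 ≤ y ∧ y < dimension)) :
    deshacer_inferior_derecha tablero x y xf yf turno dimension = tablero := by
  rw [deshacer_inferior_derecha, if_neg h]

theorem pvMain (xf yf turno dimension : Int) :
    ∀ (n : Nat) (tab : List (List Int)) (x y : Int),
      0 ≤ x → x < dimension → 0 ≤ y → y < dimension →
      (min (min (dimension - x) (dimension - y)) (min (xf - 1 - x) (yf - 1 - y))).toNat = n →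
      deshacer_inferior_derecha tab x y xf yf turno dimension = pvAltLoop turno n x y tab := by
  intro n
  induction n with
  | zero =>
    intro tab x y hx hxd hy hyd hn
    rw [deshacer_inferior_derecha, if_pos ⟨hx, hxd, hy, hyd⟩, if_neg (by omega)]
    rfl
  | succ n ih =>
    intro tab x y hx hxd hy hyd hn
    rw [deshacer_inferior_derecha, if_pos ⟨hx, hxd, hy, hyd⟩, if_pos (by omega : xf - 1 > x ∧ y < yf - 1)]
    rw [pvAltLoop]
    by_cases hlen : x + 1 < (tab.length : Int)
    · have hget : PySem.List.pyGet? tab (x + 1) = some (tab[(x + 1).toNat]'(by omega)) :=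
        PySem.List.pyGet?_eq_some_getElem tab (by omega) (by omega)
      set row := tab[(x + 1).toNat]'(by omega) with hrow
      by_cases hrl : y + 1 < (row.length : Int)
      · have hrset : PySem.List.pySet? row (y + 1) (turno * -1) =
            some (row.set (y + 1).toNat (turno * -1)) := by
          have := PySem.List.pySet?_natCast row (y + 1).toNat (turno * -1) (by omega)
          rwa [(by omega : (((y + 1).toNat : Nat) : Int) = y + 1)] at this
        have htset : PySem.List.pySet? tab (x + 1) (row.set (y + 1).toNat (turno * -1)) =
            some (tab.set (x + 1).toNat (row.set (y + 1).toNat (turno * -1))) := by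
          have := PySem.List.pySet?_natCast tab (x + 1).toNat
            (row.set (y + 1).toNat (turno * -1)) (by omega)
          rwa [(by omega : (((x + 1).toNat : Nat) : Int) = x + 1)] at this
        have hsetD : PySem.List.pySetD tab (x + 1) (PySem.List.pySetD row (y + 1) (-turno)) =
            tab.set (x + 1).toNat (row.set (y + 1).toNat (turno * -1)) := by
          rw [PySem.List.pySetD_of_nonneg _ _ (by omega),
              PySem.List.pySetD_of_nonneg _ _ (by omega)]
          ring_nf
        simp only [pvSetCell, hget, hrset, htset, if_pos hlen, if_pos hrl, hsetD]
        by_cases hnext : x + 1 < dimension ∧ y + 1 < dimension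
        · exact ih _ (x + 1) (y + 1) (by omega) hnext.1 (by omega) hnext.2 (by omega)
        · have hn0 : n = 0 := by omega
          subst hn0
          rw [pvA_out _ _ _ _ _ _ _ (by omega)]
          rfl
      · -- row write out of range: A's pySet? on the row fails
        have hrset : PySem.List.pySet? row (y + 1) (turno * -1) = none := by
          rw [PySem.List.pySet?_eq_none_iff]
          simp only [PySem.Raise.InRange]
          omega
        simp only [pvSetCell, hget, hrset, if_pos hlen, if_neg hrl]
    · have hget : PySem.List.pyGet? tab (x + 1) = none := by
        rw [PySem.List.pyGet?_eq_none_iff]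
        simp only [PySem.Raise.InRange]
        omega
      simp only [pvSetCell, hget, if_neg hlen]

-- ===== VERDICT (by name: the statement is the Claim_ definition above) =====
theorem deshacer_inferior_derecha_spec : Claim_equal_deshacer_inferior_derecha := by
  intro tablero x y xf yf turno dimension _
  unfold Spec_deshacer_inferior_derecha deshacer_inferior_derecha_alt
  by_cases h : 0 ≤ x ∧ x < dimension ∧ 0 ≤ y ∧ y < dimension
  · rw [if_pos h]
    exact pvMain xf yf turno dimension _ tablero x y h.1 h.2.1 h.2.2.1 h.2.2.2 rfl
  · rw [if_neg h]
    exact pvA_out _ _ _ _ _ _ _ h
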